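-- pv_equiv track=rewrite | github.com/Ag3497120/verantyx-v6 | arc/cross2.py | _panels_h
-- ===== SOURCE A (Python) =====
-- def _panels_h(g, bg):
--     h,w=len(g),len(g[0]); seps=[]
--     for r in range(h):
--         vs=set(g[r])
--         if len(vs)==1 and g[r][0]!=bg: seps.append((r,g[r][0]))
--     if not seps: return [],[]
--     bounds=[-1]+[r for r,_ in seps]+[h]; panels=[]
--     for i in range(len(bounds)-1):
--         rs,re=bounds[i]+1,bounds[i+1]
--         if rs<re: panels.append([g[r][:] for r in range(rs,re)])
--     return panels, seps
-- ===== SOURCE B (Python) =====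
-- def _panels_h(g, bg):
--     # Single pass: stream rows, flushing the current run at each separator row.
--     seps = []
--     panels = []
--     cur = []
--     for r, row in enumerate(g):
--         if len(set(row)) == 1 and row[0] != bg:
--             seps.append((r, row[0]))
--             if cur:
--                 panels.append(cur)
--                 cur = []
--         else:
--             cur.append(row[:])
--     if not seps:
--         return [], []
--     if cur:
--         panels.append(cur)
--     return panels, seps
-- ===== Notes on version B (the rewrite author's own statement) =====
-- stated objective: simpler
-- what changed: Replaces A's two-phase scheme (collect separator rows, then re-slice the grid between bound indices) with a single streaming pass that accumulates the current run of non-separator rows and flushes it at each separator.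
import Mathlib
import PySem

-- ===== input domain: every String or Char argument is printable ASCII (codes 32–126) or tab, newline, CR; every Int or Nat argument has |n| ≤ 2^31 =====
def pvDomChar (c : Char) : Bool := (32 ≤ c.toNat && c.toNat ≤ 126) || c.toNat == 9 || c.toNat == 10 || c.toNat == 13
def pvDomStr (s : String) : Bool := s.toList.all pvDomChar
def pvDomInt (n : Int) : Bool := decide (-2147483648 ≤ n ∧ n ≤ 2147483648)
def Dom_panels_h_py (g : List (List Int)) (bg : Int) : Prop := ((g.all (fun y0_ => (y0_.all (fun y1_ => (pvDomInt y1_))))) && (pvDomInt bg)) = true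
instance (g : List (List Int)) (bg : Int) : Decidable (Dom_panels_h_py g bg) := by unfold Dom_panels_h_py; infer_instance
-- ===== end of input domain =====

-- B replaces A's two-phase scheme (collect separators, then re-slice between bounds) by one
-- streaming pass that flushes the current run of rows at each separator; same results on Pre_ (g ≠ []).


-- ===== PORT A =====
def panels_h_py (g : List (List Int)) (bg : Int) : List (List (List Int)) × (List (Int × Int)) :=
  let h : Int := (g.length : Int)
  -- w = len(g[0]); unused afterwards; g[0] raises IndexError on g = [] (excluded by Pre_)
  let _w : Int := (((PySem.List.pyGet? g 0).getD []).length : Int)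
  let seps : List (Int × Int) :=
    (PySem.List.pyRange 0 h 1).foldl (fun seps r =>
      let row := PySem.List.pyGetD g r []
      let vs := PySem.Set.ofList row
      if (vs.length = 1 ∧ ¬ (PySem.List.pyGetD row 0 0 = bg)) then
        seps ++ [(r, PySem.List.pyGetD row 0 0)]
      else seps) []
  if seps = [] then ([], [])
  else
    let bounds : List Int := [(-1 : Int)] ++ seps.map Prod.fst ++ [h]
    let panels : List (List (List Int)) :=
      (PySem.List.pyRange 0 ((bounds.length : Int) - 1) 1).foldl (fun panels i =>
        let rs := PySem.List.pyGetD bounds i 0 + 1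
        let re := PySem.List.pyGetD bounds (i + 1) 0
        if rs < re then
          panels ++ [(PySem.List.pyRange rs re 1).map (fun r => PySem.List.pyGetD g r [])]
        else panels) []
    (panels, seps)

-- ===== PORT B =====
-- the streaming loop of Source B: state (cur, panels, seps), one step per row
def panelsGoB (bg : Int) : List (List Int) → Int → List (List Int) →
    List (List (List Int)) → List (Int × Int) →
    List (List Int) × List (List (List Int)) × List (Int × Int)
  | [], _, cur, panels, seps => (cur, panels, seps)
  | row :: rest, r, cur, panels, seps =>
    if ((PySem.Set.ofList row).length = 1 ∧ ¬ (PySem.List.pyGetD row 0 0 = bg)) then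
      panelsGoB bg rest (r + 1) []
        (if cur ≠ [] then panels ++ [cur] else panels)
        (seps ++ [(r, PySem.List.pyGetD row 0 0)])
    else
      panelsGoB bg rest (r + 1) (cur ++ [row]) panels seps

def panels_h_py_alt (g : List (List Int)) (bg : Int) : List (List (List Int)) × (List (Int × Int)) :=
  let t := panelsGoB bg g 0 [] [] []
  if t.2.2 = [] then ([], [])
  else (if t.1 ≠ [] then t.2.1 ++ [t.1] else t.2.1, t.2.2)

-- ===== PRECONDITION & SPEC =====
-- Pre_ excludes only the empty grid, on which A raises IndexError at g[0].
def Pre_panels_h_py (g : List (List Int)) (bg : Int) : Prop := g ≠ []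
instance (g : List (List Int)) (bg : Int) : Decidable (Pre_panels_h_py g bg) := by unfold Pre_panels_h_py; infer_instance
def pvWitness_panels_h_py : List (List Int) × Int := ([[1, 1], [2, 3]], 1)

def Spec_panels_h_py (g : List (List Int)) (bg : Int) (out : List (List (List Int)) × (List (Int × Int))) : Prop := out = panels_h_py_alt g bg
instance (g : List (List Int)) (bg : Int) (out : List (List (List Int)) × (List (Int × Int))) : Decidable (Spec_panels_h_py g bg out) := by unfold Spec_panels_h_py; infer_instance

-- ===== CLAIM (what is proved, stated in full; the proofs are below) =====
def Claim_equal_panels_h_py : Prop := ∀ (g : List (List Int)) (bg : Int), Dom_panels_h_py g bg → Pre_panels_h_py g bg → Spec_panels_h_py g bg (panels_h_py g bg)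

-- ===== LEMMAS AND PROOFS =====

-- rows g[a:b] as copied by both programs
def rowsSlice (g : List (List Int)) (a b : Int) : List (List Int) :=
  (PySem.List.pyRange a b 1).map (fun r => PySem.List.pyGetD g r [])

-- separator list of `rows` when they sit at absolute index s
def sepIdx (bg : Int) : List (List Int) → Int → List (Int × Int)
  | [], _ => []
  | row :: rest, s =>
    (if ((PySem.Set.ofList row).length = 1 ∧ ¬ (PySem.List.pyGetD row 0 0 = bg)) then
      [(s, PySem.List.pyGetD row 0 0)] else []) ++ sepIdx bg rest (s + 1)

-- panels carved between consecutive bounds (prev, then the remaining bound list)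
def pbAll (g : List (List Int)) : Int → List Int → List (List (List Int))
  | _, [] => []
  | prev, i :: is =>
    (if prev + 1 < i then [rowsSlice g (prev + 1) i] else []) ++ pbAll g i is

lemma getD_of_drop_cons {α : Type} {G rest : List α} {row d : α} {s : Nat}
    (h : G.drop s = row :: rest) : G.getD s d = row := by
  have h1 : G[s]? = some row := by
    have := List.getElem?_drop (xs := G) (i := s) (j := 0)
    rw [h] at this; simpa using this.symm
  simp [List.getD_eq_getElem?_getD, h1]

lemma drop_lt_of_cons {α : Type} {G rest : List α} {row : α} {s : Nat}
    (h : G.drop s = row :: rest) : s < G.length := by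
  by_contra hc
  simp [List.drop_eq_nil_of_le (by omega : G.length ≤ s)] at h

-- A's first loop computes sepIdx
lemma sepsA_eq (G : List (List Int)) (bg : Int) :
    ∀ (rows : List (List Int)) (s : Nat) (acc : List (Int × Int)),
      G.drop s = rows →
      (PySem.List.pyRange (s : Int) (G.length : Int) 1).foldl (fun seps r =>
        let row := PySem.List.pyGetD G r []
        let vs := PySem.Set.ofList row
        if (vs.length = 1 ∧ ¬ (PySem.List.pyGetD row 0 0 = bg)) then
          seps ++ [(r, PySem.List.pyGetD row 0 0)]
        else seps) acc
      = acc ++ sepIdx bg rows (s : Int) := by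
  intro rows
  induction rows with
  | nil =>
    intro s acc h
    have hs : (G.length : Int) ≤ (s : Int) := by
      exact_mod_cast List.drop_eq_nil_iff.mp h
    rw [PySem.List.pyRange_one_eq_nil hs]
    simp [sepIdx]
  | cons row rest ih =>
    intro s acc h
    have hlt : s < G.length := drop_lt_of_cons h
    have hrow : PySem.List.pyGetD G (s : Int) [] = row := by
      rw [PySem.List.pyGetD_natCast]; exact getD_of_drop_cons h
    have hrest : G.drop (s + 1) = rest := by
      have := congrArg List.tail h
      simpa [List.tail_drop] using this
    rw [PySem.List.pyRange_one_cons (by exact_mod_cast hlt)]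
    rw [List.foldl_cons]
    simp only [hrow]
    have hcast : ((s : Int) + 1) = ((s + 1 : Nat) : Int) := by push_cast; ring
    rw [hcast, ih (s + 1) _ hrest, ← hcast]
    by_cases hsep : ((PySem.Set.ofList row).length = 1 ∧ ¬ (PySem.List.pyGetD row 0 0 = bg))
    · rw [if_pos hsep]
      simp [sepIdx, hsep, List.append_assoc]
    · rw [if_neg hsep]
      simp [sepIdx, hsep]

-- A's second loop computes pbAll over the bounds list
lemma panelsA_eq (G : List (List Int)) (bounds : List Int) :
    ∀ (tl : List Int) (prev : Int) (k : Nat) (acc : List (List (List Int))),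
      bounds.drop k = prev :: tl →
      (PySem.List.pyRange (k : Int) ((bounds.length : Int) - 1) 1).foldl (fun panels i =>
        let rs := PySem.List.pyGetD bounds i 0 + 1
        let re := PySem.List.pyGetD bounds (i + 1) 0
        if rs < re then
          panels ++ [(PySem.List.pyRange rs re 1).map (fun r => PySem.List.pyGetD G r [])]
        else panels) acc
      = acc ++ pbAll G prev tl := by
  intro tl
  induction tl with
  | nil =>
    intro prev k acc h
    have hlt : k < bounds.length := drop_lt_of_cons h
    have hk : bounds.length - k = 1 := by
      have := congrArg List.length h
      simp [List.length_drop] at this; omega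
    rw [PySem.List.pyRange_one_eq_nil (by push_cast; omega)]
    simp [pbAll]
  | cons i is ih =>
    intro prev k acc h
    have hlt : k < bounds.length := drop_lt_of_cons h
    have hlen : bounds.length - k = 2 + is.length := by
      have := congrArg List.length h
      simp [List.length_drop] at this; omega
    have hprev : PySem.List.pyGetD bounds (k : Int) 0 = prev := by
      rw [PySem.List.pyGetD_natCast]; exact getD_of_drop_cons h
    have hdrop1 : bounds.drop (k + 1) = i :: is := by
      have := congrArg List.tail h
      simpa [List.tail_drop] using this
    have hcast : ((k : Int) + 1) = ((k + 1 : Nat) : Int) := by push_cast; ring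
    have hi : PySem.List.pyGetD bounds ((k : Int) + 1) 0 = i := by
      rw [hcast, PySem.List.pyGetD_natCast]; exact getD_of_drop_cons hdrop1
    rw [PySem.List.pyRange_one_cons (by push_cast; omega)]
    rw [List.foldl_cons]
    simp only [hprev, hi]
    rw [hcast, ih i (k + 1) _ hdrop1]
    by_cases hc : prev + 1 < i
    · rw [if_pos hc]; simp [pbAll, hc, rowsSlice, List.append_assoc]
    · rw [if_neg hc]; simp [pbAll, hc]

-- the streaming invariant of B's loop
lemma goB_inv (G : List (List Int)) (bg : Int) :
    ∀ (rows : List (List Int)) (s : Nat) (cur : List (List Int))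
      (panels : List (List (List Int))) (seps : List (Int × Int)),
      G.drop s = rows → s + rows.length = G.length → cur.length ≤ s →
      cur = rowsSlice G ((s : Int) - cur.length) s →
      (panelsGoB bg rows (s : Int) cur panels seps).2.2 = seps ++ sepIdx bg rows (s : Int) ∧
      (let t := panelsGoB bg rows (s : Int) cur panels seps
       (if t.1 ≠ [] then t.2.1 ++ [t.1] else t.2.1))
      = panels ++ pbAll G ((s : Int) - cur.length - 1)
          ((sepIdx bg rows (s : Int)).map Prod.fst ++ [(G.length : Int)]) := by
  intro rows
  induction rows with
  | nil =>
    intro s cur panels seps hdrop hlen hcle hcur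
    have hsG : (s : Int) = (G.length : Int) := by
      simp at hlen; exact_mod_cast hlen
    constructor
    · simp [panelsGoB, sepIdx]
    · simp only [panelsGoB, sepIdx, List.map_nil, List.nil_append, pbAll]
      by_cases hc : cur = []
      · subst hc
        have hcond : ¬ ((s : Int) - (([] : List (List Int)).length : Int) - 1 + 1 < (G.length : Int)) := by
          simp; omega
      

        simp only [List.append_nil, hcond, if_neg, ne_eq, not_true_eq_false, if_false]
      · have hne : cur ≠ [] := hc
        have hlen0 : 0 < cur.length := List.length_pos_iff.mpr hc
        rw [if_pos hne, if_pos (by rw [← hsG]; push_cast; omega)]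
        rw [← hsG]
        have heq : (s : Int) - (cur.length : Int) - 1 + 1 = (s : Int) - cur.length := by ring
        rw [heq, ← hcur]
        simp
  | cons row rest ih =>
    intro s cur panels seps hdrop hlen hcle hcur
    have hlt : s < G.length := drop_lt_of_cons hdrop
    have hrow : PySem.List.pyGetD G (s : Int) [] = row := by
      rw [PySem.List.pyGetD_natCast]; exact getD_of_drop_cons hdrop
    have hrest : G.drop (s + 1) = rest := by
      have := congrArg List.tail hdrop
      simpa [List.tail_drop] using this
    have hlen' : (s + 1) + rest.length = G.length := by simp at hlen; omega
    have hcast : ((s : Int) + 1) = ((s + 1 : Nat) : Int) := by push_cast; ring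
    by_cases hsep : ((PySem.Set.ofList row).length = 1 ∧ ¬ (PySem.List.pyGetD row 0 0 = bg))
    · have hsep' := hsep
      have hstep : panelsGoB bg (row :: rest) (s : Int) cur panels seps
          = panelsGoB bg rest ((s : Int) + 1) []
              (if cur ≠ [] then panels ++ [cur] else panels)
              (seps ++ [((s : Int), PySem.List.pyGetD row 0 0)]) := by
        simp [panelsGoB, hsep']
      have hcur0 : ([] : List (List Int)) = rowsSlice G (((s + 1 : Nat) : Int) - (([] : List (List Int)).length : Int)) ((s + 1 : Nat) : Int) := by
        simp [rowsSlice, PySem.List.pyRange_one_eq_nil (by omega : ((s + 1 : Nat) : Int) ≤ ((s + 1 : Nat) : Int) - ((0 : Nat) : Int))]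
      obtain ⟨ih1, ih2⟩ := ih (s + 1) [] (if cur ≠ [] then panels ++ [cur] else panels)
        (seps ++ [((s : Int), PySem.List.pyGetD row 0 0)]) hrest hlen' (by simp) hcur0
      constructor
      · rw [hstep, hcast, ih1]
        simp [sepIdx, hsep, List.append_assoc, ← hcast]
      · rw [hstep, hcast, ih2]
        simp only [sepIdx, hsep, if_pos, List.map_append, List.map_cons, List.singleton_append,
          List.map_nil, List.nil_append]
        have hflush : (if cur ≠ [] then panels ++ [cur] else panels)
            = panels ++ (if (s : Int) - (cur.length : Int) - 1 + 1 < (s : Int) then [rowsSlice G ((s : Int) - (cur.length : Int) - 1 + 1) (s : Int)] else []) := by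
          by_cases hc : cur = []
          · subst hc
            have hcond : ¬ ((s : Int) - (([] : List (List Int)).length : Int) - 1 + 1 < (s : Int)) := by simp
            simp [hcond]
          · have hlen0 : 0 < cur.length := List.length_pos_iff.mpr hc
            have heq : (s : Int) - (cur.length : Int) - 1 + 1 = (s : Int) - cur.length := by ring
            rw [if_pos hc, if_pos (by omega), heq, ← hcur]
        rw [hflush, List.append_assoc]
        rw [← hcast] at ih2 ⊢
        have h0 : ((s : Int) + 1) - (([] : List (List Int)).length : Int) - 1 = (s : Int) := by simp
        rw [h0] at *
        simp [pbAll]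
    · have hsep' := hsep
      have hstep : panelsGoB bg (row :: rest) (s : Int) cur panels seps
          = panelsGoB bg rest ((s : Int) + 1) (cur ++ [row]) panels seps := by
        simp [panelsGoB, hsep']
      have hcur' : cur ++ [row] = rowsSlice G (((s + 1 : Nat) : Int) - (((cur ++ [row]).length : Nat) : Int)) ((s + 1 : Nat) : Int) := by
        have hb : ((s + 1 : Nat) : Int) - (((cur ++ [row]).length : Nat) : Int) = (s : Int) - (cur.length : Int) := by
          simp only [List.length_append, List.length_cons, List.length_nil]; push_cast; ring
        rw [hb]
        unfold rowsSlice
        rw [show ((s + 1 : Nat) : Int) = (s : Int) + 1 by push_cast; ring]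
        rw [PySem.List.pyRange_one_succ_right (by omega)]
        rw [List.map_append]
        unfold rowsSlice at hcur
        rw [← hcur]
        simp [hrow]
      obtain ⟨ih1, ih2⟩ := ih (s + 1) (cur ++ [row]) panels seps hrest hlen'
        (by simp; omega) hcur'
      constructor
      · rw [hstep, hcast, ih1, ← hcast]; simp [sepIdx, hsep]
      · rw [hstep, hcast, ih2, ← hcast]
        have hb : ((s : Int) + 1) - (((cur ++ [row]).length : Nat) : Int) - 1 = (s : Int) - (cur.length : Int) - 1 := by
          simp only [List.length_append, List.length_cons, List.length_nil]; push_cast; ring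
        rw [hb]
        simp [sepIdx, hsep]

-- ===== VERDICT (by name: the statement is the Claim_ definition above) =====
theorem panels_h_py_spec : Claim_equal_panels_h_py := by
  intro g bg _ hpre
  unfold Spec_panels_h_py panels_h_py panels_h_py_alt
  have hseps := sepsA_eq g bg g 0 [] (by simp)
  simp only [Nat.cast_zero] at hseps
  have hgo := goB_inv g bg g 0 [] [] [] (by simp) (by simp) (by simp)
    (by simp [rowsSlice, PySem.List.pyRange_one_eq_nil (by omega : (0:Int) ≤ 0 - ((0:Nat):Int))])
  simp only [Nat.cast_zero, Nat.cast_ofNat] at hgo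
  obtain ⟨hgo1, hgo2⟩ := hgo
  simp only []
  rw [hseps, List.nil_append, hgo1, List.nil_append]
  by_cases hempty : sepIdx bg g 0 = []
  · simp [hempty]
  · rw [if_neg hempty, if_neg hempty]
    have hpanels := panelsA_eq g ((-1 : Int) :: ((sepIdx bg g 0).map Prod.fst ++ [(g.length : Int)]))
      ((sepIdx bg g 0).map Prod.fst ++ [(g.length : Int)]) (-1) 0 [] (by simp)
    simp only [Nat.cast_zero] at hpanels
    refine congrArg₂ Prod.mk ?_ rfl
    rw [show ([(-1 : Int)] ++ (sepIdx bg g 0).map Prod.fst ++ [(g.length : Int)])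
          = ((-1 : Int) :: ((sepIdx bg g 0).map Prod.fst ++ [(g.length : Int)])) by simp]
    rw [hpanels, List.nil_append]
    rw [hgo2]
    norm_num
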